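-- pv_equiv track=rewrite | github.com/aldoyfa/LSB-Steganography | stego/a51.py | _key_to_bits
-- ===== SOURCE A (Python) =====
-- def _key_to_bits(key_str):
--     raw = key_str.encode('utf-8')
--     if len(raw) < 8:
--         raw = raw + b'\x00' * (8 - len(raw))
--     else:
--         raw = raw[:8]
--     bits = []
--     for byte in raw:
--         for i in range(8):
--             bits.append((byte >> i) & 1)
--     return bits
-- ===== SOURCE B (Python) =====
-- def _key_to_bits(key_str):
--     raw = key_str.encode('utf-8')
--     if len(raw) < 8:
--         raw = raw + b'\x00' * (8 - len(raw))
--     else: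
--         raw = raw[:8]
--     value = int.from_bytes(raw, 'little')
--     return [(value >> j) & 1 for j in range(64)]
-- ===== Notes on version B (the rewrite author's own statement) =====
-- stated objective: alternative
-- what changed: Packs the 8 key bytes into one little-endian integer with int.from_bytes and extracts all 64 bits in a single comprehension over range(64), replacing A's nested per-byte/per-bit loops with append.
import Mathlib
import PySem

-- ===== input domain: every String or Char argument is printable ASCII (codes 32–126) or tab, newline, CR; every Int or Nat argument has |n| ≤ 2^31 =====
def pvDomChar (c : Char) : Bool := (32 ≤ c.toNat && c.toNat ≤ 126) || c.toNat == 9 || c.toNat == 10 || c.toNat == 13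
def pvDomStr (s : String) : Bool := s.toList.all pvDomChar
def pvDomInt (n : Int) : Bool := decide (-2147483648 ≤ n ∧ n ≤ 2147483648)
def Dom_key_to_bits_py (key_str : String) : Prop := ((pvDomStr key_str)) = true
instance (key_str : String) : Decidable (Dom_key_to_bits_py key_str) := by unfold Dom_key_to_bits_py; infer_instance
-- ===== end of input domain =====

-- B packs the 8 key bytes into one little-endian integer and reads all 64 bits in a single pass (alternative decomposition, same cost).


-- ===== PORT A =====
-- utf-8 encode: exact on the ASCII domain (one byte per char)
def pvEncode (s : String) : List Nat := s.toList.map Char.toNat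

def pvPad8 (raw : List Nat) : List Nat :=
  if raw.length < 8 then raw ++ List.replicate (8 - raw.length) 0 else raw.take 8

def key_to_bits_py (key_str : String) : List Int :=
  let raw := pvPad8 (pvEncode key_str)
  raw.foldl (fun bits byte =>
    (List.range 8).foldl (fun bits i => bits ++ [(((byte >>> i) &&& 1 : Nat) : Int)]) bits) []

-- ===== PORT B =====
-- int.from_bytes(raw, 'little') = Σ raw[i] * 256^i, written as the standard foldr
def pvFromBytesLE (raw : List Nat) : Nat := raw.foldr (fun b acc => b + 256 * acc) 0

def key_to_bits_py_alt (key_str : String) : List Int :=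
  let raw := pvPad8 (pvEncode key_str)
  let value := pvFromBytesLE raw
  (List.range 64).map (fun j => (((value >>> j) &&& 1 : Nat) : Int))

-- ===== PRECONDITION & SPEC =====
def Spec_key_to_bits_py (key_str : String) (out : List Int) : Prop := out = key_to_bits_py_alt key_str
instance (key_str : String) (out : List Int) : Decidable (Spec_key_to_bits_py key_str out) := by unfold Spec_key_to_bits_py; infer_instance

-- ===== CLAIM (what is proved, stated in full; the proofs are below) =====
def Claim_equal_key_to_bits_py : Prop := ∀ (key_str : String), Dom_key_to_bits_py key_str → Spec_key_to_bits_py key_str (key_to_bits_py key_str)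

-- ===== LEMMAS AND PROOFS =====

theorem pv_foldl_append {α β : Type} (f : α → List β) :
    ∀ (l : List α) (init : List β),
      l.foldl (fun acc x => acc ++ f x) init = init ++ l.flatMap f := by
  intro l
  induction l with
  | nil => simp
  | cons b t ih => intro init; simp [List.foldl, ih, List.flatMap_cons]

theorem pv_inner (byte : Nat) (bits : List Int) :
    (List.range 8).foldl (fun bits i => bits ++ [(((byte >>> i) &&& 1 : Nat) : Int)]) bits
      = bits ++ (List.range 8).map (fun i => (((byte >>> i) &&& 1 : Nat) : Int)) := by
  have := pv_foldl_append (fun i => [(((byte >>> i) &&& 1 : Nat) : Int)]) (List.range 8) bits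
  simpa [List.flatMap_singleton'] using this

theorem pv_bit_low (b v j : Nat) (hb : b < 256) (hj : j < 8) :
    ((b + 256 * v) >>> j) &&& 1 = (b >>> j) &&& 1 := by
  simp only [Nat.shiftRight_eq_div_pow, Nat.and_one_is_mod]
  interval_cases j <;> omega

theorem pv_bit_high (b v j : Nat) (hb : b < 256) :
    ((b + 256 * v) >>> (8 + j)) &&& 1 = (v >>> j) &&& 1 := by
  simp only [Nat.shiftRight_eq_div_pow, Nat.and_one_is_mod]
  have h1 : (b + 256 * v) / 2 ^ (8 + j) = ((b + 256 * v) / 256) / 2 ^ j := by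
    rw [pow_add]
    norm_num [Nat.div_div_eq_div_mul]
  have h2 : (b + 256 * v) / 256 = v := by omega
  rw [h1, h2]

theorem pv_core :
    ∀ (raw : List Nat), (∀ b ∈ raw, b < 256) →
      raw.flatMap (fun byte => (List.range 8).map (fun i => (((byte >>> i) &&& 1 : Nat) : Int)))
        = (List.range (8 * raw.length)).map
            (fun j => (((pvFromBytesLE raw >>> j) &&& 1 : Nat) : Int)) := by
  intro raw
  induction raw with
  | nil => simp
  | cons b t ih =>
    intro h
    have hb : b < 256 := h b (List.mem_cons_self)
    have hrange : List.range (8 * (b :: t).length) = List.range 8 ++ (List.range (8 * t.length)).map (8 + ·) := by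
      have : 8 * (b :: t).length = 8 + 8 * t.length := by simp [List.length_cons]; ring
      rw [this, List.range_add]
    rw [List.flatMap_cons, ih (fun x hx => h x (List.mem_cons_of_mem _ hx)), hrange, List.map_append]
    congr 1
    · apply List.map_congr_left
      intro i hi
      have : i < 8 := List.mem_range.mp hi
      simp only [pvFromBytesLE, List.foldr_cons]
      rw [pv_bit_low b _ i hb this]
    · rw [List.map_map]
      apply List.map_congr_left
      intro j _
      simp only [Function.comp, pvFromBytesLE, List.foldr_cons]
      rw [pv_bit_high b _ j hb]

theorem pv_pad8_length (raw : List Nat) : (pvPad8 raw).length = 8 := by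
  unfold pvPad8
  split <;> simp <;> omega

theorem pv_pad8_lt (raw : List Nat) (h : ∀ b ∈ raw, b < 256) :
    ∀ b ∈ pvPad8 raw, b < 256 := by
  intro b hb
  unfold pvPad8 at hb
  split at hb
  · rcases List.mem_append.mp hb with h1 | h1
    · exact h b h1
    · have := List.eq_of_mem_replicate h1; omega
  · exact h b (List.mem_of_mem_take hb)

-- ===== VERDICT (by name: the statement is the Claim_ definition above) =====
theorem key_to_bits_py_spec : Claim_equal_key_to_bits_py := by
  intro key_str hdom
  unfold Spec_key_to_bits_py key_to_bits_py key_to_bits_py_alt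
  have hlt : ∀ b ∈ pvPad8 (pvEncode key_str), b < 256 := by
    apply pv_pad8_lt
    intro b hb
    unfold pvEncode at hb
    rcases List.mem_map.mp hb with ⟨c, hc, rfl⟩
    have := List.all_eq_true.mp hdom c hc
    simp [pvDomChar] at this
    omega
  have hlen := pv_pad8_length (pvEncode key_str)
  simp only [pv_inner]
  rw [pv_foldl_append (fun byte => (List.range 8).map (fun i => (((byte >>> i) &&& 1 : Nat) : Int)))]
  have := pv_core (pvPad8 (pvEncode key_str)) hlt
  rw [hlen] at this
  simpa using this
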